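-- pv_equiv track=rewrite | github.com/SEpapoulis/MAPT | MAPT/InSilico_PCR.py | search_primer
-- ===== SOURCE A (Python) =====
-- def get_primerSS(primer):
--     amb={'R':['A','G'],'Y':['C','T'],'S':['G','C'],'W':['A','T'],'K':['G','T'],'M':['A','C'],
--         'B':['C','G','T'],'V':['A','C','G'],'D':['A','G','T'],'H':['A','C','T'],'N':['A','T','G','C']}
--     Pset=['']
--     for char in primer:
--         if char in amb: #for each sequence in Fset, duplicate and add each possilbe amb to child
--             nts = amb[char]
--             _temp=[]
--             for seq in Pset:
--                 for nt in nts: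
--                     _temp.append(seq+nt)
--             Pset=_temp
--         else:
--             for i in range(0,len(Pset)):
--                 Pset[i]=Pset[i]+char
--     return(set(Pset))
--
-- def search_primer(seq,primer,direction):
--     primerlen=len(primer)
--     primer_set=get_primerSS(primer)
--     for i in range(primerlen,len(seq)):
--         end=i
--         start=i-primerlen
--         window=seq[start:end]
--         if window in primer_set:
--             if direction == 'F':
--                 return(start)
--             else:
--                 return(end+1)
-- ===== SOURCE B (Python) =====
-- def search_primer(seq, primer, direction):
--     amb = {'R': 'AG', 'Y': 'CT', 'S': 'GC', 'W': 'AT', 'K': 'GT', 'M': 'AC',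
--            'B': 'CGT', 'V': 'ACG', 'D': 'AGT', 'H': 'ACT', 'N': 'ATGC'}
--     allowed = [amb.get(p, p) for p in primer]
--     L = len(primer)
--     start = 0
--     while start + L < len(seq):
--         if all(seq[start + j] in a for j, a in enumerate(allowed)):
--             return start if direction == 'F' else start + L + 1
--         start += 1
--     return None
-- ===== Notes on version B (the rewrite author's own statement) =====
-- stated objective: faster
-- what changed: B drops A's combinatorial expansion of the ambiguous primer into the set of all concrete primer strings (up to 4^k strings for k ambiguity codes) and instead precomputes the allowed-nucleotide string per primer position and scans the sequence with a while loop over the start index, checking each window character by direct indexing.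
import Mathlib
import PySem

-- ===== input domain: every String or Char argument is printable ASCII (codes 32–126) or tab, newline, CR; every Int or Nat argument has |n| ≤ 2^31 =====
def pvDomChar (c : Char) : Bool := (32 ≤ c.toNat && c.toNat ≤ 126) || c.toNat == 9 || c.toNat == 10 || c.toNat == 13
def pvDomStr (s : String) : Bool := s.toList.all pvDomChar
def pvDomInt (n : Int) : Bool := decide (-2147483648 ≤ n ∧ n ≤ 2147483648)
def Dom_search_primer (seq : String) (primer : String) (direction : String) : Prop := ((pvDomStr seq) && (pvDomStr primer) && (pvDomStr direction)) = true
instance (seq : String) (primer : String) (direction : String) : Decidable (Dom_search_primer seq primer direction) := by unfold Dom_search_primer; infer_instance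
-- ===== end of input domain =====

-- B replaces A's combinatorial expansion of the ambiguous primer (product of all
-- per-position alternatives, then set membership of each window slice) by a while
-- loop over the start index checking each window character by direct indexing
-- against the precomputed per-position allowed nucleotides (objective: faster).

-- ===== PORT A =====
-- A's 'amb' dict: values are lists of one-character strings (List Char of length 1).
def ambA : PySem.Dict Char (List (List Char)) :=
  PySem.Dict.ofList
    [('R', [['A'],['G']]), ('Y', [['C'],['T']]), ('S', [['G'],['C']]), ('W', [['A'],['T']]),
     ('K', [['G'],['T']]), ('M', [['A'],['C']]), ('B', [['C'],['G'],['T']]),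
     ('V', [['A'],['C'],['G']]), ('D', [['A'],['G'],['T']]), ('H', [['A'],['C'],['T']]),
     ('N', [['A'],['T'],['G'],['C']])]

-- one iteration of A's 'for char in primer' loop
def primerStep (Pset : List (List Char)) (char : Char) : List (List Char) :=
  match PySem.Dict.get? ambA char with
  | some nts => Pset.foldl (fun t s => nts.foldl (fun t nt => t ++ [s ++ nt]) t) []
  | none => Pset.map (fun s => s ++ [char])   -- Pset[i] = Pset[i] + char for each i

def get_primerSS (primer : List Char) : PySem.Set (List Char) :=
  PySem.Set.ofList (primer.foldl primerStep [[]])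

-- body of A's 'for i in range(primerlen, len(seq))' loop (early return via Option accumulator)
def stepA (primer_set : PySem.Set (List Char)) (s : List Char) (primerlen : Int)
    (direction : String) (acc : Option Int) (i : Int) : Option Int :=
  match acc with
  | some r => some r
  | none =>
    if primer_set.contains (PySem.List.slice s (some (i - primerlen)) (some i)) then
      some (if direction = "F" then i - primerlen else i + 1)
    else none

def search_primer (seq : String) (primer : String) (direction : String) : Option Int :=
  (PySem.List.pyRange (PySem.Str.len primer) (PySem.Str.len seq)).foldl
    (stepA (get_primerSS primer.toList) seq.toList (PySem.Str.len primer) direction) none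

-- ===== PORT B =====
-- B's 'amb' dict: values are strings of allowed nucleotides.
def ambB : PySem.Dict Char (List Char) :=
  PySem.Dict.ofList
    [('R', ['A','G']), ('Y', ['C','T']), ('S', ['G','C']), ('W', ['A','T']),
     ('K', ['G','T']), ('M', ['A','C']), ('B', ['C','G','T']), ('V', ['A','C','G']),
     ('D', ['A','G','T']), ('H', ['A','C','T']), ('N', ['A','T','G','C'])]

-- 'all(seq[start + j] in a for j, a in enumerate(allowed))': walk 'allowed' carrying
-- the running index start + j (indices stay in range inside scanB's guard)
def checkAt (s : List Char) : List (List Char) → Nat → Bool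
  | [], _ => true
  | a :: rest, j =>
    (match s[j]? with
     | some c => a.contains c
     | none => false) && checkAt s rest (j + 1)

-- B's 'while start + L < len(seq)' loop
def scanB (s : List Char) (allowed : List (List Char)) (L : Nat) (direction : String)
    (start : Nat) : Option Int :=
  if _h : start + L < s.length then
    if checkAt s allowed start then
      some (if direction = "F" then (start : Int) else (start : Int) + L + 1)
    else
      scanB s allowed L direction (start + 1)
  else none
termination_by s.length - start

def search_primer_alt (seq : String) (primer : String) (direction : String) : Option Int :=
  scanB seq.toList
    (primer.toList.map (fun p => (PySem.Dict.get? ambB p).getD [p]))  -- allowed = [amb.get(p, p) for p in primer]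
    primer.toList.length direction 0

-- ===== PRECONDITION & SPEC =====
def Spec_search_primer (seq : String) (primer : String) (direction : String) (out : Option Int) : Prop := out = search_primer_alt seq primer direction
instance (seq : String) (primer : String) (direction : String) (out : Option Int) : Decidable (Spec_search_primer seq primer direction out) := by unfold Spec_search_primer; infer_instance

-- ===== CLAIM (what is proved, stated in full; the proofs are below) =====
def Claim_equal_search_primer : Prop := ∀ (seq : String) (primer : String) (direction : String), Dom_search_primer seq primer direction → Spec_search_primer seq primer direction (search_primer seq primer direction)

-- ===== LEMMAS AND PROOFS =====

-- B's per-character alternatives, as a total function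
def bAll (c : Char) : List Char := (PySem.Dict.get? ambB c).getD [c]

-- the two dict literals agree: A's alternatives are B's, each wrapped as a 1-char string
lemma amb_link (c : Char) :
    (PySem.Dict.get? ambA c).getD [[c]] = (bAll c).map (fun ch => [ch]) := by
  have ha : ambA = PySem.Dict.mk
      [('R', [['A'],['G']]), ('Y', [['C'],['T']]), ('S', [['G'],['C']]), ('W', [['A'],['T']]),
       ('K', [['G'],['T']]), ('M', [['A'],['C']]), ('B', [['C'],['G'],['T']]),
       ('V', [['A'],['C'],['G']]), ('D', [['A'],['G'],['T']]), ('H', [['A'],['C'],['T']]),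
       ('N', [['A'],['T'],['G'],['C']])] := rfl
  have hb : ambB = PySem.Dict.mk
      [('R', ['A','G']), ('Y', ['C','T']), ('S', ['G','C']), ('W', ['A','T']),
       ('K', ['G','T']), ('M', ['A','C']), ('B', ['C','G','T']), ('V', ['A','C','G']),
       ('D', ['A','G','T']), ('H', ['A','C','T']), ('N', ['A','T','G','C'])] := rfl
  simp only [bAll, ha, hb, PySem.Dict.get?_mk_cons, beq_iff_eq]
  by_cases h1 : 'R' = c; · subst h1; decide
  by_cases h2 : 'Y' = c; · subst h2; decide
  by_cases h3 : 'S' = c; · subst h3; decide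
  by_cases h4 : 'W' = c; · subst h4; decide
  by_cases h5 : 'K' = c; · subst h5; decide
  by_cases h6 : 'M' = c; · subst h6; decide
  by_cases h7 : 'B' = c; · subst h7; decide
  by_cases h8 : 'V' = c; · subst h8; decide
  by_cases h9 : 'D' = c; · subst h9; decide
  by_cases h10 : 'H' = c; · subst h10; decide
  by_cases h11 : 'N' = c; · subst h11; decide
  rw [if_neg h1, if_neg h2, if_neg h3, if_neg h4, if_neg h5, if_neg h6, if_neg h7, if_neg h8,
    if_neg h9, if_neg h10, if_neg h11, if_neg h1, if_neg h2, if_neg h3, if_neg h4, if_neg h5,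
    if_neg h6, if_neg h7, if_neg h8, if_neg h9, if_neg h10, if_neg h11]
  simp [PySem.Dict.get?]

lemma primerStep_mem (Pset : List (List Char)) (c : Char) (w : List Char) :
    w ∈ primerStep Pset c ↔ ∃ a ∈ Pset, ∃ ch ∈ bAll c, w = a ++ [ch] := by
  unfold primerStep
  cases h : PySem.Dict.get? ambA c with
  | none =>
    have hb : (bAll c).map (fun ch => [ch]) = [[c]] := by rw [← amb_link c, h]; rfl
    have hb' : bAll c = [c] := by
      cases hbc : bAll c with
      | nil => rw [hbc] at hb; simp at hb
      | cons x xs =>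
        rw [hbc] at hb; simp at hb
        obtain ⟨hx, hxs⟩ := hb
        simp [hx, hxs]
    simp [hb', eq_comm]
  | some nts =>
    have hnts : nts = (bAll c).map (fun ch => [ch]) := by rw [← amb_link c, h]; rfl
    simp only [PySem.List.foldl_append_singleton_eq_map, PySem.List.foldl_append_eq_flatMap,
      List.nil_append, List.mem_flatMap, List.mem_map, hnts]
    aesop

-- characterisation of A's expanded set: membership = per-position membership
lemma foldl_primerStep_mem (p : List Char) : ∀ (acc : List (List Char)) (ws : List Char),
    ws ∈ p.foldl primerStep acc ↔
      ∃ a ∈ acc, ∃ rest, List.Forall₂ (fun pc ch => ch ∈ bAll pc) p rest ∧ ws = a ++ rest := by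
  induction p with
  | nil => intro acc ws; simp
  | cons c p ih =>
    intro acc ws
    rw [List.foldl_cons, ih]
    constructor
    · rintro ⟨a', ha', rest, hrest, rfl⟩
      obtain ⟨a, ha, ch, hch, rfl⟩ := (primerStep_mem acc c a').mp ha'
      exact ⟨a, ha, ch :: rest, List.Forall₂.cons hch hrest, by simp⟩
    · rintro ⟨a, ha, rest, hrest, rfl⟩
      obtain ⟨ch, rest', hch, hrest', rfl⟩ := List.forall₂_cons_left_iff.mp hrest
      exact ⟨a ++ [ch], (primerStep_mem acc c _).mpr ⟨a, ha, ch, hch, rfl⟩, rest', hrest', by simp⟩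

lemma mem_Pset (primer ws : List Char) :
    ws ∈ primer.foldl primerStep [[]] ↔ List.Forall₂ (fun pc ch => ch ∈ bAll pc) primer ws := by
  rw [foldl_primerStep_mem]; simp

-- B's indexed check equals the Forall₂ characterisation on the L-char window at start
lemma checkAt_iff (p : List Char) : ∀ (s : List Char) (st : Nat), st + p.length ≤ s.length →
    (checkAt s (p.map bAll) st = true ↔
      List.Forall₂ (fun pc ch => ch ∈ bAll pc) p ((s.drop st).take p.length)) := by
  induction p with
  | nil => intro s st _; simp [checkAt]
  | cons c p ih =>
    intro s st h
    have hst : st < s.length := by simp at h; omega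
    have hget : s[st]? = some s[st] := List.getElem?_eq_getElem hst
    have hdrop : s.drop st = s[st] :: s.drop (st + 1) := List.drop_eq_getElem_cons hst
    rw [List.map_cons]
    simp only [checkAt, hget, hdrop, List.length_cons, List.take_succ_cons, List.forall₂_cons,
      Bool.and_eq_true, List.contains_iff_mem]
    constructor
    · rintro ⟨h1, h2⟩
      exact ⟨h1, (ih s (st + 1) (by simp at h ⊢; omega)).mp h2⟩
    · rintro ⟨h1, h2⟩
      exact ⟨h1, (ih s (st + 1) (by simp at h ⊢; omega)).mpr h2⟩

-- a 'return' freezes A's fold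
lemma foldl_stepA_some (ps : PySem.Set (List Char)) (s : List Char) (L : Int)
    (dir : String) (r : Int) : ∀ (l : List Int), l.foldl (stepA ps s L dir) (some r) = some r := by
  intro l; induction l with
  | nil => rfl
  | cons x xs ih => simpa [stepA] using ih

-- main bridge: the remaining iterations of A's fold compute scanB from start
lemma main_bridge (p s : List Char) (dir : String) : ∀ (st : Nat),
    (PySem.List.pyRange ((p.length : Int) + st) (s.length : Int)).foldl
      (stepA (get_primerSS p) s (p.length : Int) dir) none
      = scanB s (p.map bAll) p.length dir st := by
  intro st
  induction hn : s.length - st using Nat.strong_induction_on generalizing st with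
  | _ n ih =>
  by_cases h : st + p.length < s.length
  · have hlt : (p.length : Int) + st < (s.length : Int) := by omega
    rw [PySem.List.pyRange_one_cons hlt, List.foldl_cons]
    have hi : ((p.length : Int) + st) - (p.length : Int) = (st : Int) := by ring
    have hslice : PySem.List.slice s (some (st : Int)) (some ((p.length : Int) + st))
        = List.take (((p.length : Int) + st).toNat - (st : Int).toNat) (List.drop (st : Int).toNat s) :=
      PySem.List.slice_of_nonneg s (by positivity) (by positivity) (by omega) (by omega)
    have htoNat : ((p.length : Int) + st).toNat - (st : Int).toNat = p.length := by omega
    have hslice' : PySem.List.slice s (some (st : Int)) (some ((p.length : Int) + st))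
        = (s.drop st).take p.length := by
      rw [hslice, htoNat]; norm_num
    have hcond : (get_primerSS p).contains
          (PySem.List.slice s (some (st : Int)) (some ((p.length : Int) + st)))
        = checkAt s (p.map bAll) st := by
      have hA : (get_primerSS p).contains
            (PySem.List.slice s (some (st : Int)) (some ((p.length : Int) + st))) = true ↔
          List.Forall₂ (fun pc ch => ch ∈ bAll pc) p ((s.drop st).take p.length) := by
        unfold get_primerSS PySem.Set.contains
        rw [List.contains_iff_mem, PySem.Set.mem_ofList, mem_Pset, hslice']
      exact Bool.coe_iff_coe.mp (hA.trans (checkAt_iff p s st (by omega)).symm)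
    rw [scanB, dif_pos h]
    simp only [stepA, hi, hcond]
    cases hc : checkAt s (p.map bAll) st with
    | true =>
      rw [if_pos rfl, foldl_stepA_some]
      congr 1
      split_ifs <;> ring
    | false =>
      rw [if_neg (by simp)]
      have harg : (p.length : Int) + st + 1 = (p.length : Int) + ((st + 1 : Nat) : Int) := by
        push_cast; ring
      rw [harg]
      exact ih (s.length - (st + 1)) (by omega) (st + 1) rfl
  · have hge : (s.length : Int) ≤ (p.length : Int) + st := by omega
    rw [PySem.List.pyRange_one_eq_nil hge, scanB, dif_neg h]
    rfl

-- ===== VERDICT (by name: the statement is the Claim_ definition above) =====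
theorem search_primer_spec : Claim_equal_search_primer := by
  intro seq primer direction _
  unfold Spec_search_primer search_primer search_primer_alt
  have hmap : primer.toList.map (fun p => (PySem.Dict.get? ambB p).getD [p])
      = primer.toList.map bAll := rfl
  rw [hmap, PySem.Str.len_eq, PySem.Str.len_eq]
  have := main_bridge primer.toList seq.toList direction 0
  simpa using this
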